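-- pv_equiv track=rewrite | github.com/hakuorai/EasyMLSBRN | bstool/bstool/transforms/lines.py | mask2lines
-- ===== SOURCE A (Python) =====
-- import itertools
--
-- def mask2lines(mask):
--     """convert to mask with polygon format to line
--
--     Args:
--         mask (polygon): input mask
--
--     Returns:
--         list: converted lines
--     """
--     mask_point_num = len(mask) // 2
--     mask_junctions = [mask[i:i + 2] for i in range(0, len(mask), 2)]
--     point_combinnations = list(itertools.combinations(range(0, mask_point_num, 1), 2))
--
--     lines = []
--     for combination in point_combinnations:
--         if abs(combination[0] - combination[1]) == 1 or abs(combination[0] - combination[1]) == mask_point_num - 1: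
--             lines.append(mask_junctions[combination[0]] + mask_junctions[combination[1]])
--
--     return lines
-- ===== SOURCE B (Python) =====
-- def mask2lines(mask):
--     """convert to mask with polygon format to line (O(n): emit the qualifying
--     adjacent/closing segments directly instead of filtering all index pairs)"""
--     n = len(mask) // 2
--     pts = [mask[2 * i:2 * i + 2] for i in range(n)]
--     if n < 2:
--         return []
--     lines = [pts[0] + pts[1]]
--     if n >= 3:
--         lines.append(pts[0] + pts[n - 1])
--         for i in range(1, n - 1):
--             lines.append(pts[i] + pts[i + 1])
--     return lines
-- ===== Notes on version B (the rewrite author's own statement) =====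
-- stated objective: faster
-- what changed: B emits the qualifying segments directly — the first adjacent pair, the closing first-to-last pair, then each remaining consecutive pair — instead of enumerating all O(n^2) index combinations and filtering them.
import Mathlib
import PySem

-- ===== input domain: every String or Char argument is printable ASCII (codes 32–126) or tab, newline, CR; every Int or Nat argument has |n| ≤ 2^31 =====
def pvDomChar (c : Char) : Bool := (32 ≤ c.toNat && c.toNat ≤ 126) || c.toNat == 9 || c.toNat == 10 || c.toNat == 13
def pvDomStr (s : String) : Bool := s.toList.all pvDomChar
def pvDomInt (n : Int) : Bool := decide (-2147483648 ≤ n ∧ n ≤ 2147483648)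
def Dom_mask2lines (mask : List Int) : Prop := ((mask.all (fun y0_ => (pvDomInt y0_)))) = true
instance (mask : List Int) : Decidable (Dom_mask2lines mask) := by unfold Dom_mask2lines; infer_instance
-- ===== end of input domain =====

-- B replaces A's enumerate-all-index-pairs-and-filter (O(n^2)) with direct emission of the qualifying segments (O(n)); return values proved equal on all inputs.

-- ===== PORT A =====
def mask2lines (mask : List Int) : List (List Int) :=
  let maskPointNum : Int := PySem.Int.floordiv (mask.length : Int) 2
  let maskJunctions : List (List Int) :=
    (PySem.List.pyRange 0 (mask.length : Int) 2).map
      (fun i => PySem.List.slice mask (some i) (some (i + 2)))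
  -- itertools.combinations(range(0, mask_point_num, 1), 2), tuples as 2-element lists
  let combos : List (List Int) :=
    PySem.List.combinations (PySem.List.pyRange 0 maskPointNum 1) 2
  combos.foldl (fun lines c =>
    if ((PySem.List.pyGetD c 0 0 - PySem.List.pyGetD c 1 0).natAbs : Int) = 1 ∨
       ((PySem.List.pyGetD c 0 0 - PySem.List.pyGetD c 1 0).natAbs : Int) = maskPointNum - 1 then
      lines ++ [PySem.List.pyGetD maskJunctions (PySem.List.pyGetD c 0 0) [] ++
                PySem.List.pyGetD maskJunctions (PySem.List.pyGetD c 1 0) []]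
    else lines) []

-- ===== PORT B =====
def mask2lines_alt (mask : List Int) : List (List Int) :=
  let n : Int := PySem.Int.floordiv (mask.length : Int) 2
  let pts : List (List Int) :=
    (PySem.List.pyRange 0 n 1).map
      (fun i => PySem.List.slice mask (some (2 * i)) (some (2 * i + 2)))
  if n < 2 then []
  else
    let lines : List (List Int) :=
      [PySem.List.pyGetD pts 0 [] ++ PySem.List.pyGetD pts 1 []]
    if 3 ≤ n then
      let lines := lines ++ [PySem.List.pyGetD pts 0 [] ++ PySem.List.pyGetD pts (n - 1) []]
      (PySem.List.pyRange 1 (n - 1) 1).foldl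
        (fun acc i => acc ++ [PySem.List.pyGetD pts i [] ++ PySem.List.pyGetD pts (i + 1) []]) lines
    else lines

-- ===== PRECONDITION & SPEC =====
def Spec_mask2lines (mask : List Int) (out : List (List Int)) : Prop := out = mask2lines_alt mask
instance (mask : List Int) (out : List (List Int)) : Decidable (Spec_mask2lines mask out) := by unfold Spec_mask2lines; infer_instance

-- ===== CLAIM (what is proved, stated in full; the proofs are below) =====
def Claim_equal_mask2lines : Prop := ∀ (mask : List Int), Dom_mask2lines mask → Spec_mask2lines mask (mask2lines mask)

-- ===== LEMMAS AND PROOFS =====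

theorem pvGet0 (a j : Int) : PySem.List.pyGetD [a, j] 0 0 = a := by
  simp [PySem.List.pyGetD, PySem.List.pyIdx?, PySem.List.pyGet?]

theorem pvGet1 (a j : Int) : PySem.List.pyGetD [a, j] 1 0 = j := by
  simp [PySem.List.pyGetD, PySem.List.pyIdx?, PySem.List.pyGet?]

-- among the j with a < j < n, only j = a+1 satisfies |a-j| ∈ {1, n-1} (for a ≥ 1)
theorem pvInner (n a : Int) (ha : 1 ≤ a) (hlt : a < n) :
    (PySem.List.pyRange (a+1) n).filter
      (fun j => decide ((((a - j).natAbs : Int) = 1) ∨ (((a - j).natAbs : Int) = n - 1)))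
    = if a + 1 < n then [a+1] else [] := by
  by_cases h2 : a + 1 < n
  · rw [if_pos h2, PySem.List.pyRange_one_cons h2, List.filter_cons]
    have hhd : (decide ((((a - (a+1)).natAbs : Int) = 1) ∨ (((a - (a+1)).natAbs : Int) = n - 1))) = true := by
      simp only [decide_eq_true_eq]; omega
    have htl : (PySem.List.pyRange (a+1+1) n).filter
        (fun j => decide ((((a - j).natAbs : Int) = 1) ∨ (((a - j).natAbs : Int) = n - 1))) = [] := by
      rw [List.filter_eq_nil_iff]
      intro j hj
      rw [PySem.List.mem_pyRange_one] at hj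
      simp only [decide_eq_true_eq]
      omega
    rw [hhd, if_pos rfl, htl]
  · rw [if_neg h2, PySem.List.pyRange_one_eq_nil (by omega)]
    rfl

-- filtered combinations over [a, n) for a ≥ 1: exactly the consecutive pairs
theorem pvTail (n a : Int) (ha : 1 ≤ a) :
    (PySem.List.combinations (PySem.List.pyRange a n) 2).filter
      (fun c => decide ((((PySem.List.pyGetD c 0 0 - PySem.List.pyGetD c 1 0).natAbs : Int) = 1) ∨
        (((PySem.List.pyGetD c 0 0 - PySem.List.pyGetD c 1 0).natAbs : Int) = n - 1)))
    = (PySem.List.pyRange a (n-1)).map (fun i => [i, i+1]) := by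
  by_cases hlt : a < n
  · rw [PySem.List.pyRange_one_cons hlt]
    rw [show (2 : Nat) = 1 + 1 from rfl, PySem.List.combinations_cons_succ,
        PySem.List.combinations_one]
    rw [List.filter_append, List.map_map, List.filter_map]
    rw [show (1 : Nat) + 1 = 2 from rfl]
    rw [pvTail n (a+1) (by omega)]
    have hcongr : (PySem.List.pyRange (a+1) n).filter
        ((fun c => decide ((((PySem.List.pyGetD c 0 0 - PySem.List.pyGetD c 1 0).natAbs : Int) = 1) ∨
          (((PySem.List.pyGetD c 0 0 - PySem.List.pyGetD c 1 0).natAbs : Int) = n - 1))) ∘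
          ((fun c => a :: c) ∘ fun x => [x]))
        = (PySem.List.pyRange (a+1) n).filter
          (fun j => decide ((((a - j).natAbs : Int) = 1) ∨ (((a - j).natAbs : Int) = n - 1))) := by
      apply List.filter_congr
      intro j _
      simp only [Function.comp_apply, pvGet0, pvGet1]
    rw [hcongr, pvInner n a ha hlt]
    by_cases h2 : a + 1 < n
    · rw [if_pos h2, PySem.List.pyRange_one_cons (show a < n - 1 by omega)]
      simp
    · rw [if_neg h2, PySem.List.pyRange_one_eq_nil (show n - 1 ≤ a by omega),
          PySem.List.pyRange_one_eq_nil (show n - 1 ≤ a + 1 by omega)]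
      simp
  · rw [PySem.List.pyRange_one_eq_nil (by omega),
        PySem.List.pyRange_one_eq_nil (show n - 1 ≤ a by omega)]
    rw [show (2 : Nat) = 1 + 1 from rfl, PySem.List.combinations_nil_succ]
    simp
termination_by (n - a).toNat
decreasing_by omega

-- among the j with 0 < j < n, exactly j = 1 and j = n-1 satisfy |0-j| ∈ {1, n-1}
theorem pvHeadFilter (n : Int) (h2 : 2 ≤ n) :
    (PySem.List.pyRange 1 n).filter
      (fun j => decide (((((0:Int) - j).natAbs : Int) = 1) ∨ ((((0:Int) - j).natAbs : Int) = n - 1)))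
    = if 3 ≤ n then [1, n-1] else [1] := by
  by_cases h3 : 3 ≤ n
  · rw [if_pos h3]
    rw [PySem.List.pyRange_one_append 1 2 n (by omega) (by omega),
        PySem.List.pyRange_one_append 2 (n-1) n (by omega) (by omega)]
    have e1 : PySem.List.pyRange 1 2 = [1] := by
      have := PySem.List.pyRange_one_singleton 1; norm_num at this; exact this
    have e3 : PySem.List.pyRange (n-1) n = [n-1] := by
      have := PySem.List.pyRange_one_singleton (n-1)
      rw [sub_add_cancel] at this; exact this
    rw [e1, e3, List.filter_append, List.filter_append]
    have emid : (PySem.List.pyRange 2 (n-1)).filter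
        (fun j => decide (((((0:Int) - j).natAbs : Int) = 1) ∨ ((((0:Int) - j).natAbs : Int) = n - 1))) = [] := by
      rw [List.filter_eq_nil_iff]
      intro j hj
      rw [PySem.List.mem_pyRange_one] at hj
      simp only [decide_eq_true_eq]
      omega
    rw [emid]
    have ef1 : ([(1:Int)]).filter
        (fun j => decide (((((0:Int) - j).natAbs : Int) = 1) ∨ ((((0:Int) - j).natAbs : Int) = n - 1))) = [1] := by
      simp
    have ef3 : ([n-1]).filter
        (fun j => decide (((((0:Int) - j).natAbs : Int) = 1) ∨ ((((0:Int) - j).natAbs : Int) = n - 1))) = [n-1] := by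
      simp only [List.filter_cons, List.filter_nil, decide_eq_true_eq]
      rw [if_pos (by omega)]
    rw [ef1, ef3]
    rfl
  · rw [if_neg h3]
    have hn2 : n = 2 := by omega
    subst hn2
    have e1 : PySem.List.pyRange (1:Int) 2 = [1] := by
      have := PySem.List.pyRange_one_singleton 1; norm_num at this; exact this
    rw [e1]
    simp

-- the filtered pair list of A: (0,1), (0,n-1) when n ≥ 3, then all consecutive pairs
theorem pvCombos (n : Int) (h2 : 2 ≤ n) :
    (PySem.List.combinations (PySem.List.pyRange 0 n) 2).filter
      (fun c => decide ((((PySem.List.pyGetD c 0 0 - PySem.List.pyGetD c 1 0).natAbs : Int) = 1) ∨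
        (((PySem.List.pyGetD c 0 0 - PySem.List.pyGetD c 1 0).natAbs : Int) = n - 1)))
    = (if 3 ≤ n then [(1:Int), n-1] else [1]).map (fun j => [0, j]) ++
      (PySem.List.pyRange 1 (n-1)).map (fun i => [i, i+1]) := by
  rw [PySem.List.pyRange_one_cons (show (0:Int) < n by omega)]
  rw [show (2 : Nat) = 1 + 1 from rfl, PySem.List.combinations_cons_succ,
      PySem.List.combinations_one]
  rw [List.filter_append, List.map_map, List.filter_map]
  rw [show (1 : Nat) + 1 = 2 from rfl]
  rw [show (0:Int) + 1 = 1 from rfl]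
  rw [pvTail n 1 (by omega)]
  have hcongr : (PySem.List.pyRange 1 n).filter
      ((fun c => decide ((((PySem.List.pyGetD c 0 0 - PySem.List.pyGetD c 1 0).natAbs : Int) = 1) ∨
        (((PySem.List.pyGetD c 0 0 - PySem.List.pyGetD c 1 0).natAbs : Int) = n - 1))) ∘
        ((fun c => (0:Int) :: c) ∘ fun x => [x]))
      = (PySem.List.pyRange 1 n).filter
        (fun j => decide (((((0:Int) - j).natAbs : Int) = 1) ∨ ((((0:Int) - j).natAbs : Int) = n - 1))) := by
    apply List.filter_congr
    intro j _
    simp only [Function.comp_apply, pvGet0, pvGet1]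
  rw [hcongr, pvHeadFilter n h2]
  rfl

-- looking up index i < len(mask)//2 in A's step-2 junction list is the slice mask[2i:2i+2]
theorem pvJunLookup (mask : List Int) (i : Int) (h0 : 0 ≤ i)
    (h1 : i < (mask.length : Int) / 2) :
    PySem.List.pyGetD
      ((PySem.List.pyRange 0 (mask.length : Int) 2).map
        (fun k => PySem.List.slice mask (some k) (some (k + 2)))) i []
    = PySem.List.slice mask (some (2 * i)) (some (2 * i + 2)) := by
  rw [PySem.List.pyRange_of_pos 0 (mask.length : Int) (by norm_num)]
  rw [if_pos (show (0:Int) < (mask.length : Int) by omega)]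
  rw [List.map_map]
  rw [PySem.List.pyGetD_eq_getElem _ _ h0 (by simp; omega)]
  simp only [List.getElem_map, List.getElem_range, Function.comp_apply]
  rw [show ((i.toNat : Int)) = i from Int.toNat_of_nonneg h0]
  norm_num

theorem pvMain (mask : List Int) : mask2lines mask = mask2lines_alt mask := by
  simp only [mask2lines, mask2lines_alt,
    PySem.Int.floordiv_eq_ediv_of_pos (show (0:Int) < 2 by norm_num)]
  rw [PySem.List.foldl_append_ite]
  by_cases hlt : (mask.length : Int) / 2 < 2
  · rw [if_pos hlt,
      PySem.List.combinations_eq_nil_of_length_lt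
        (xs := PySem.List.pyRange 0 ((mask.length : Int) / 2)) (r := 2)
        (by rw [PySem.List.length_pyRange_one]; omega)]
    simp
  · rw [if_neg hlt, pvCombos _ (by omega)]
    by_cases h3 : 3 ≤ (mask.length : Int) / 2
    · rw [if_pos h3, if_pos h3, PySem.List.foldl_append_singleton_eq_map]
      simp only [List.map_append, List.map_cons, List.map_nil, List.map_map, Function.comp_def,
        pvGet0, pvGet1, List.nil_append]
      rw [pvJunLookup mask 0 (by omega) (by omega), pvJunLookup mask 1 (by omega) (by omega),
          pvJunLookup mask ((mask.length : Int)/2 - 1) (by omega) (by omega)]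
      rw [PySem.List.pyGetD_map_pyRange_of_nonneg _ _ _ _ (by omega) (by omega),
          PySem.List.pyGetD_map_pyRange_of_nonneg _ _ _ _ (by omega) (by omega),
          PySem.List.pyGetD_map_pyRange_of_nonneg _ _ _ _ (by omega) (by omega)]
      simp only [List.cons_append, List.nil_append, List.cons.injEq, mul_zero, mul_one]
      refine ⟨by norm_num, by norm_num, ?_⟩
      apply List.map_congr_left
      intro i hi
      rw [PySem.List.mem_pyRange_one] at hi
      rw [pvJunLookup mask i (by omega) (by omega), pvJunLookup mask (i+1) (by omega) (by omega),
          PySem.List.pyGetD_map_pyRange_of_nonneg _ _ _ _ (by omega) (by omega),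
          PySem.List.pyGetD_map_pyRange_of_nonneg _ _ _ _ (by omega) (by omega)]
    · rw [if_neg h3, if_neg h3]
      rw [PySem.List.pyRange_one_eq_nil (show (mask.length : Int)/2 - 1 ≤ 1 by omega)]
      simp only [List.map_cons, List.map_nil, List.append_nil, List.nil_append,
        pvGet0, pvGet1]
      rw [pvJunLookup mask 0 (by omega) (by omega), pvJunLookup mask 1 (by omega) (by omega),
          PySem.List.pyGetD_map_pyRange_of_nonneg _ _ _ _ (by omega) (by omega),
          PySem.List.pyGetD_map_pyRange_of_nonneg _ _ _ _ (by omega) (by omega)]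

-- ===== VERDICT (by name: the statement is the Claim_ definition above) =====
theorem mask2lines_spec : Claim_equal_mask2lines := by
  unfold Claim_equal_mask2lines Spec_mask2lines
  intro mask _
  exact pvMain mask
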